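-- pv_equiv track=rewrite | github.com/avi78/Accenture_practice | min_subarray.py | subarray
-- ===== SOURCE A (Python) =====
-- def subarray(arr,k):
--     if arr is None or len(arr)<k:
--         return None
--     min_sum = float('inf')
--     min_subarray = []
--     for i in range(len(arr) - k + 1):
--         subarray = arr[i:i+k]
--         current_sum = sum(subarray)
--         if(current_sum< min_sum):
--             min_sum = current_sum
--             min_subarray = subarray
--     return min_subarray
-- ===== SOURCE B (Python) =====
-- def subarray(arr, k):
--     if arr is None or len(arr) < k:
--         return None
--     if k < 0:
--         return None
--     window = sum(arr[:k])
--     best_sum, best_start = window, 0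
--     for i in range(1, len(arr) - k + 1):
--         window += arr[i + k - 1] - arr[i - 1]
--         if window < best_sum:
--             best_sum, best_start = window, i
--     return arr[best_start:best_start + k]
-- ===== Notes on version B (the rewrite author's own statement) =====
-- stated objective: faster
-- what changed: B replaces A's re-slicing and re-summing of every length-k window with a single sliding-window pass that updates one running sum incrementally and only records the best start index, slicing once at the end.
-- intended difference: For k < 0 A returns a list picked via Python's negative-slice accident (e.g. subarray([-5,2],-1) == [-5]); B returns None, the intended answer since a negative window length is invalid. — e.g. on subarray([-5, 2], -1): A returns some [-5], B returns none
import Mathlib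
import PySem

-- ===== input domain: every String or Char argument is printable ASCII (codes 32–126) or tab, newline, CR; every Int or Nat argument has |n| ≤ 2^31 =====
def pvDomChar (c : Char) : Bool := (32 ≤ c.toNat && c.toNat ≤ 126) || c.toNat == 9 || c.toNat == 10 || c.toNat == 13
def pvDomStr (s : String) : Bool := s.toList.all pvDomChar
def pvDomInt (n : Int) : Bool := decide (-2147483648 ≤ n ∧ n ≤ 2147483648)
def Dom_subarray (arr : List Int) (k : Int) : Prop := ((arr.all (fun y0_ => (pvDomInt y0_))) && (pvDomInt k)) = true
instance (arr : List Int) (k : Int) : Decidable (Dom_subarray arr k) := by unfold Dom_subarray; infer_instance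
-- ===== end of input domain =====

-- B replaces A's per-window re-slice-and-sum with one sliding-window pass keeping an incrementally
-- updated running sum and the best start index; for k < 0 B returns none (intended difference, see D_subarray).

-- ===== PORT A =====
-- min_sum = float('inf') is modelled as `none` (the first comparison `current_sum < inf` always
-- succeeds, exactly the `none` branch); the fold state is (min_sum, min_subarray).
def subarray (arr : List Int) (k : Int) : Option (List Int) :=
  if (arr.length : Int) < k then none
  else
    let st := (PySem.List.pyRange 0 ((arr.length : Int) - k + 1) 1).foldl
      (fun (st : Option Int × List Int) i =>
        let sub := PySem.List.slice arr (some i) (some (i + k))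
        let cs := sub.sum
        match st.1 with
        | none => (some cs, sub)
        | some m => if cs < m then (some cs, sub) else st)
      (none, [])
    some st.2

-- ===== PORT B =====
-- fold state is (window, best_sum, best_start); arr[i+k-1] and arr[i-1] are ported with pyGetD:
-- for every i the loop visits (1 ≤ i ≤ len-k, 0 ≤ k) both indices are in range, so the default is never read.
def subarray_alt (arr : List Int) (k : Int) : Option (List Int) :=
  if (arr.length : Int) < k then none
  else if k < 0 then none
  else
    let w0 := (PySem.List.slice arr none (some k)).sum
    let res := (PySem.List.pyRange 1 ((arr.length : Int) - k + 1) 1).foldl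
      (fun (st : Int × Int × Int) i =>
        let w := st.1 + PySem.List.pyGetD arr (i + k - 1) 0 - PySem.List.pyGetD arr (i - 1) 0
        if w < st.2.1 then (w, w, i) else (w, st.2.1, st.2.2))
      (w0, w0, 0)
    some (PySem.List.slice arr (some res.2.2) (some (res.2.2 + k)))

-- ===== PRECONDITION & SPEC =====
-- For k < 0 A returns a list picked via Python's negative-slice accident (e.g.
-- subarray([-5,2],-1) == [-5]); B returns None, the intended answer since a negative
-- window length is invalid.
def D_subarray (arr : List Int) (k : Int) : Prop := k < 0

instance (arr : List Int) (k : Int) : Decidable (D_subarray arr k) := by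
  unfold D_subarray; infer_instance

def Spec_subarray (arr : List Int) (k : Int) (out : Option (List Int)) : Prop :=
  ¬ D_subarray arr k → out = subarray_alt arr k

instance (arr : List Int) (k : Int) (out : Option (List Int)) : Decidable (Spec_subarray arr k out) := by
  unfold Spec_subarray; infer_instance

def pvDiffWitness_subarray : List Int × Int := ([-5, 2], -1)
def pvDiffWitnessOut_subarray : (Option (List Int)) × (Option (List Int)) := (some [-5], none)

-- ===== CLAIM (what is proved, stated in full; the proofs are below) =====
def Claim_unchanged_subarray : Prop := ∀ (arr : List Int) (k : Int), Dom_subarray arr k → Spec_subarray arr k (subarray arr k)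
def Claim_changed_subarray : Prop := Dom_subarray (pvDiffWitness_subarray.1) (pvDiffWitness_subarray.2) ∧ D_subarray (pvDiffWitness_subarray.1) (pvDiffWitness_subarray.2) ∧ subarray (pvDiffWitness_subarray.1) (pvDiffWitness_subarray.2) = pvDiffWitnessOut_subarray.1 ∧ subarray_alt (pvDiffWitness_subarray.1) (pvDiffWitness_subarray.2) = pvDiffWitnessOut_subarray.2 ∧ pvDiffWitnessOut_subarray.1 ≠ pvDiffWitnessOut_subarray.2
def Claim_exact_subarray : Prop := ∀ (arr : List Int) (k : Int), Dom_subarray arr k → D_subarray arr k → subarray arr k ≠ subarray_alt arr k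

-- ===== LEMMAS AND PROOFS =====

-- the window of length K starting at index j, and its sum
def pvWin (arr : List Int) (K j : Nat) : List Int := (arr.drop j).take K
def pvW (arr : List Int) (K j : Nat) : Int := (pvWin arr K j).sum

lemma pvP_succ (arr : List Int) (t : Nat) :
    (arr.take (t + 1)).sum = (arr.take t).sum + arr.getD t 0 := by
  rw [List.take_add_one, List.sum_append, List.getD_eq_getElem?_getD]
  cases arr[t]? <;> simp

lemma pvW_eq (arr : List Int) (K j : Nat) :
    pvW arr K j = (arr.take (j + K)).sum - (arr.take j).sum := by
  have h : (arr.take (j + K)).sum = (arr.take j).sum + ((arr.drop j).take K).sum := by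
    rw [List.take_add, List.sum_append]
  rw [pvW, pvWin]; omega

-- sliding-window increment (holds for every j: out-of-range getD contributes 0 on both sides)
lemma pvW_succ (arr : List Int) (K j : Nat) :
    pvW arr K (j + 1) = pvW arr K j + arr.getD (j + K) 0 - arr.getD j 0 := by
  rw [pvW_eq, pvW_eq]
  have h1 := pvP_succ arr (j + K)
  have h2 := pvP_succ arr j
  have h3 : j + 1 + K = (j + K) + 1 := by omega
  rw [h3, h1, h2]; omega

-- the two fold steps, named so the ports' lambdas can be rewritten to them (definitional)
def pvStepA (arr : List Int) (k : Int) (st : Option Int × List Int) (i : Int) : Option Int × List Int :=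
  let sub := PySem.List.slice arr (some i) (some (i + k))
  let cs := sub.sum
  match st.1 with
  | none => (some cs, sub)
  | some m => if cs < m then (some cs, sub) else st

def pvStepB (arr : List Int) (k : Int) (st : Int × Int × Int) (i : Int) : Int × Int × Int :=
  let w := st.1 + PySem.List.pyGetD arr (i + k - 1) 0 - PySem.List.pyGetD arr (i - 1) 0
  if w < st.2.1 then (w, w, i) else (w, st.2.1, st.2.2)

lemma subarray_def (arr : List Int) (k : Int) :
    subarray arr k = if (arr.length : Int) < k then none
      else some (((PySem.List.pyRange 0 ((arr.length : Int) - k + 1) 1).foldl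
        (pvStepA arr k) (none, [])).2) := rfl

lemma subarray_alt_def (arr : List Int) (k : Int) :
    subarray_alt arr k = if (arr.length : Int) < k then none
      else if k < 0 then none
      else
        let w0 := (PySem.List.slice arr none (some k)).sum
        let res := (PySem.List.pyRange 1 ((arr.length : Int) - k + 1) 1).foldl
          (pvStepB arr k) (w0, w0, 0)
        some (PySem.List.slice arr (some res.2.2) (some (res.2.2 + k))) := rfl

lemma pvSlice_win (arr : List Int) (K j : Nat) :
    PySem.List.slice arr (some (j : Int)) (some ((j : Int) + (K : Int))) = pvWin arr K j := by
  rw [PySem.List.slice_natCast_add, pvWin]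

-- main loop invariant: after the tail loop over range(1, M'+1) the two folds agree:
-- B's state is (running window sum, best sum, best index b) and A's is (best sum, best window)
lemma pvLoop (arr : List Int) (K : Nat) (M' : Nat) :
    ∃ b : Nat, b ≤ M' ∧
      ((PySem.List.pyRange 1 ((M' : Int) + 1) 1).foldl (pvStepB arr (K : Int))
          (pvW arr K 0, pvW arr K 0, 0) = (pvW arr K M', pvW arr K b, (b : Int))) ∧
      ((PySem.List.pyRange 1 ((M' : Int) + 1) 1).foldl (pvStepA arr (K : Int))
          (some (pvW arr K 0), pvWin arr K 0) = (some (pvW arr K b), pvWin arr K b)) := by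
  induction M' with
  | zero =>
      refine ⟨0, Nat.le_refl 0, ?_, ?_⟩ <;>
        rw [PySem.List.pyRange_one_eq_nil (by omega)] <;> simp
  | succ M ih =>
      obtain ⟨b, hb, hB, hA⟩ := ih
      have hcast : ((M + 1 : Nat) : Int) = (M : Int) + 1 := by push_cast; ring
      have hsplit : PySem.List.pyRange 1 ((M : Int) + 1 + 1) 1
          = PySem.List.pyRange 1 ((M : Int) + 1) 1 ++ [(M : Int) + 1] := by
        simpa using PySem.List.pyRange_one_succ_right (a := 1) (b := (M : Int) + 1) (by omega)
      have hidx : ((M : Int) + 1) + (K : Int) - 1 = ((M + K : Nat) : Int) := by omega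
      have hidx2 : ((M : Int) + 1) - 1 = ((M : Nat) : Int) := by omega
      have hw : pvW arr K M + PySem.List.pyGetD arr (((M : Int) + 1) + (K : Int) - 1) 0
          - PySem.List.pyGetD arr (((M : Int) + 1) - 1) 0 = pvW arr K (M + 1) := by
        rw [hidx, hidx2, PySem.List.pyGetD_natCast, PySem.List.pyGetD_natCast,
          List.getD_eq_getElem?_getD, List.getD_eq_getElem?_getD, pvW_succ,
          List.getD_eq_getElem?_getD, List.getD_eq_getElem?_getD]
      have hsub : PySem.List.slice arr (some ((M : Int) + 1)) (some (((M : Int) + 1) + (K : Int)))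
          = pvWin arr K (M + 1) := by
        rw [← hcast, pvSlice_win]
      by_cases hlt : pvW arr K (M + 1) < pvW arr K b
      · refine ⟨M + 1, le_refl _, ?_, ?_⟩
        · rw [hcast, hsplit, List.foldl_append, hB]
          simp only [pvStepB, hw, List.foldl]
          rw [if_pos hlt]
        · rw [hcast, hsplit, List.foldl_append, hA]
          simp only [pvStepA, hsub, List.foldl]
          rw [show (pvWin arr K (M + 1)).sum = pvW arr K (M + 1) from rfl, if_pos hlt]
      · refine ⟨b, by omega, ?_, ?_⟩
        · rw [hcast, hsplit, List.foldl_append, hB]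
          simp only [pvStepB, hw, List.foldl]
          rw [if_neg hlt]
        · rw [hcast, hsplit, List.foldl_append, hA]
          simp only [pvStepA, hsub, List.foldl]
          rw [show (pvWin arr K (M + 1)).sum = pvW arr K (M + 1) from rfl, if_neg hlt]

-- ===== VERDICT (by name: the statement is the Claim_ definition above) =====
theorem subarray_spec : Claim_unchanged_subarray := by
  intro arr k _ hnd
  have hk0 : 0 ≤ k := by unfold D_subarray at hnd; omega
  rw [subarray_def, subarray_alt_def]
  by_cases hlen : (arr.length : Int) < k
  · simp [hlen]
  · rw [if_neg hlen, if_neg hlen, if_neg (by omega : ¬ k < 0)]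
    set K := k.toNat with hKdef
    have hkK : k = (K : Int) := (Int.toNat_of_nonneg hk0).symm
    have hrange : (arr.length : Int) - k + 1 = ((arr.length - K : Nat) : Int) + 1 := by
      have : K ≤ arr.length := by omega
      push_cast [this]; omega
    set M := arr.length - K with hMdef
    -- B's initial window sum is the sum of the first window
    have hw0 : (PySem.List.slice arr none (some (K : Int))).sum = pvW arr K 0 := by
      rw [PySem.List.slice_to arr (Int.natCast_nonneg K), Int.toNat_natCast, pvW, pvWin,
        List.drop_zero]
    -- A: peel the first iteration i = 0
    have hpeel : PySem.List.pyRange 0 ((M : Int) + 1) 1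
        = 0 :: PySem.List.pyRange 1 ((M : Int) + 1) 1 := by
      simpa using PySem.List.pyRange_one_cons (a := 0) (b := (M : Int) + 1) (by omega)
    have hfirst : pvStepA arr k (none, []) 0 = (some (pvW arr K 0), pvWin arr K 0) := by
      simp only [pvStepA]
      have : PySem.List.slice arr (some 0) (some (0 + k)) = pvWin arr K 0 := by
        rw [show (0 : Int) = ((0 : Nat) : Int) by norm_num, hkK, pvSlice_win]
      rw [this]; rfl
    obtain ⟨b, hbM, hB, hA⟩ := pvLoop arr K M
    rw [hrange, hpeel]
    simp only [List.foldl_cons]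
    rw [hfirst, hkK, hA, hw0, hB]
    simp only []
    rw [show (b : Int) + (K : Int) = (b : Int) + (K : Int) from rfl, pvSlice_win]

theorem subarray_changed : Claim_changed_subarray := by unfold Claim_changed_subarray; decide

theorem subarray_tight : Claim_exact_subarray := by
  intro arr k _ hd h
  unfold D_subarray at hd
  rw [subarray_def, subarray_alt_def] at h
  have hlen : ¬ (arr.length : Int) < k := by omega
  rw [if_neg hlen, if_neg hlen, if_pos hd] at h
  exact Option.some_ne_none _ h
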